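-- pv_equiv track=rewrite | github.com/KmXK/dvoretskii_bot | steward/framework/callback_route.py | _split_schema
-- ===== SOURCE A (Python) =====
-- def _split_schema(schema: str) -> list[str]:
--     parts: list[str] = []
--     depth = 0
--     buf: list[str] = []
--     for ch in schema:
--         if ch == "[":
--             depth += 1
--             buf.append(ch)
--         elif ch == "]":
--             depth -= 1
--             buf.append(ch)
--         elif ch == "|" and depth == 0:
--             parts.append("".join(buf))
--             buf = []
--         else:
--             buf.append(ch)
--     if buf:
--         parts.append("".join(buf))
--     return parts
-- ===== SOURCE B (Python) =====
-- def _split_schema(schema: str) -> list[str]: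
--     parts: list[str] = []
--     acc = None
--     depth = 0
--     for tok in schema.split('|'):
--         acc = tok if acc is None else acc + '|' + tok
--         depth += tok.count('[') - tok.count(']')
--         if depth == 0:
--             parts.append(acc)
--             acc = None
--     if acc is not None:
--         parts.append(acc)
--     if parts and parts[-1] == '':
--         parts.pop()
--     return parts
-- ===== Notes on version B (the rewrite author's own statement) =====
-- stated objective: alternative
-- what changed: B splits the schema on '|' once with str.split and then merges/flushes the resulting tokens while tracking a per-token cumulative bracket depth (count('[')-count(']')), instead of A's character-by-character scan with a mutable buffer; a single trailing empty piece is dropped to give the same top-level split.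
import Mathlib
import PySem

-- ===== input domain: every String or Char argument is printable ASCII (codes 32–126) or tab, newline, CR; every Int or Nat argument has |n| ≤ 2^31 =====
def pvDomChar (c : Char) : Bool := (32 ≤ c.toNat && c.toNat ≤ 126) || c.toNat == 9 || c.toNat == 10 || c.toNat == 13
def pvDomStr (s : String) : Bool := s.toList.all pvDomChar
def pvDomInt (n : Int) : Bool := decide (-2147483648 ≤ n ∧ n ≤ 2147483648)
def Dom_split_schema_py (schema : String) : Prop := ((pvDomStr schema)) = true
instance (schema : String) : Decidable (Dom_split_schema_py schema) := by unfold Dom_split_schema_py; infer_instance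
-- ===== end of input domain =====

-- B re-implements A's character scan as a split-on-'|'-then-merge-tokens pass (objective: alternative, same O(n) cost).

-- ===== PORT A =====
-- one iteration of A's `for ch in schema` loop, state = (parts, depth, buf)
def pvStepA (st : List String × Int × List Char) (ch : Char) : List String × Int × List Char :=
  if ch = '[' then (st.1, st.2.1 + 1, st.2.2 ++ [ch])
  else if ch = ']' then (st.1, st.2.1 - 1, st.2.2 ++ [ch])
  else if ch = '|' ∧ st.2.1 = 0 then (st.1 ++ [String.ofList st.2.2], st.2.1, [])
  else (st.1, st.2.1, st.2.2 ++ [ch])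

def split_schema_py (schema : String) : List String :=
  let st := schema.toList.foldl pvStepA ([], 0, [])
  if st.2.2 ≠ [] then st.1 ++ [String.ofList st.2.2] else st.1   -- `if buf: parts.append("".join(buf))`

-- ===== PORT B =====
-- one iteration of B's `for tok in schema.split('|')` loop, state = (parts, acc, depth)
def pvStepB (st : List String × Option String × Int) (tok : String) : List String × Option String × Int :=
  let acc' := match st.2.1 with | none => tok | some a => a ++ "|" ++ tok
  let depth' := st.2.2 + (PySem.Str.count tok "[" : Int) - (PySem.Str.count tok "]" : Int)
  if depth' = 0 then (st.1 ++ [acc'], none, depth') else (st.1, some acc', depth')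

def split_schema_py_alt (schema : String) : List String :=
  -- schema.split('|'): the separator is the non-empty literal "|", so Python's split cannot raise
  let toks := (PySem.Chars.splitOn schema.toList ['|']).map String.ofList
  let st := toks.foldl pvStepB ([], none, 0)
  let parts := match st.2.1 with | none => st.1 | some a => st.1 ++ [a]
  if parts ≠ [] ∧ parts.getLast? = some "" then parts.dropLast else parts

-- ===== PRECONDITION & SPEC =====
def Spec_split_schema_py (schema : String) (out : List String) : Prop := out = split_schema_py_alt schema
instance (schema : String) (out : List String) : Decidable (Spec_split_schema_py schema out) := by unfold Spec_split_schema_py; infer_instance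

-- ===== CLAIM (what is proved, stated in full; the proofs are below) =====
def Claim_equal_split_schema_py : Prop := ∀ (schema : String), Dom_split_schema_py schema → Spec_split_schema_py schema (split_schema_py schema)

-- ===== LEMMAS AND PROOFS =====

-- spec of PySem.Chars.splitOn for the single-char separator '|': accumulator-style split
def pvF : List Char → List Char → List (List Char)
  | cur, [] => [cur.reverse]
  | cur, ch :: rest => if ch = '|' then cur.reverse :: pvF [] rest else pvF (ch :: cur) rest

-- char stream of a token list at a post-token boundary: each token preceded by its separator
def pvTailC : List (List Char) → List Char
  | [] => []
  | t :: r => '|' :: (t ++ pvTailC r)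

def pvTailS : List String → List Char
  | [] => []
  | t :: r => '|' :: (t.toList ++ pvTailS r)

def pvFinishA (st : List String × Int × List Char) : List String :=
  if st.2.2 ≠ [] then st.1 ++ [String.ofList st.2.2] else st.1

def pvFinishB (st : List String × Option String × Int) : List String :=
  let parts := match st.2.1 with | none => st.1 | some a => st.1 ++ [a]
  if parts ≠ [] ∧ parts.getLast? = some "" then parts.dropLast else parts

-- A's buffer contents at the start of a token, given B's pending accumulator
def pvPreBuf : Option String → List Char
  | none => []
  | some a => a.toList ++ ['|']

-- relation between A's state and B's state at a post-token boundary
def pvRel (partsA partsB : List String) (depth : Int) (buf : List Char) (acc : Option String) : Prop :=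
  (acc = none ∧ depth = 0 ∧ partsB = partsA ++ [String.ofList buf]) ∨
  (∃ a, acc = some a ∧ a ≠ "" ∧ depth ≠ 0 ∧ partsB = partsA ∧ buf = a.toList)

lemma pv_count_go_single (c : Char) : ∀ (fuel : ℕ) (l : List Char) (acc : ℕ),
    l.length ≤ fuel → PySem.Chars.count.go [c] fuel l acc = acc + l.count c := by
  intro fuel
  induction fuel with
  | zero =>
    intro l acc h
    have : l = [] := by cases l <;> simp_all
    subst this; simp [PySem.Chars.count.go]
  | succ fuel ih =>
    intro l acc h
    cases l with
    | nil => simp [PySem.Chars.count.go]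
    | cons x t =>
      simp only [PySem.Chars.count.go, List.isPrefixOf, Bool.and_true]
      have hdrop : List.drop [c].length (x :: t) = t := rfl
      by_cases hx : c = x
      · subst hx
        simp only [BEq.rfl, if_pos, hdrop]
        rw [ih t (acc + 1) (by simpa using Nat.le_of_succ_le_succ h)]
        simp
        omega
      · have hbe : (c == x) = false := by simpa using hx
        simp only [hbe, Bool.false_eq_true, if_neg, not_false_iff]
        rw [ih t acc (by simpa using Nat.le_of_succ_le_succ h)]
        simp [List.count_cons]
        intro h'; exact absurd h'.symm hx

lemma pv_count_single (cs : List Char) (c : Char) :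
    PySem.Chars.count cs [c] = cs.count c := by
  simp only [PySem.Chars.count, List.isEmpty_cons]
  simpa using pv_count_go_single c cs.length cs 0 (le_refl _)

lemma pv_str_count_single (t : String) (c : Char) (s : String) (hs : s.toList = [c]) :
    PySem.Str.count t s = t.toList.count c := by
  rw [PySem.Str.count_eq, hs, pv_count_single]

lemma pv_splitOn_go_spec : ∀ (fuel : ℕ) (l cur : List Char) (acc : List (List Char)),
    l.length ≤ fuel →
    PySem.Chars.splitOn.go ['|'] fuel l cur acc = acc.reverse ++ pvF cur l := by
  intro fuel
  induction fuel with
  | zero =>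
    intro l cur acc h
    have : l = [] := by cases l <;> simp_all
    subst this; simp [PySem.Chars.splitOn.go, pvF]
  | succ fuel ih =>
    intro l cur acc h
    cases l with
    | nil => simp [PySem.Chars.splitOn.go, pvF]
    | cons ch rest =>
      simp only [PySem.Chars.splitOn.go, List.isPrefixOf, Bool.and_true]
      have hdrop : List.drop (['|'] : List Char).length (ch :: rest) = rest := rfl
      by_cases hc : ch = '|'
      · subst hc
        simp only [BEq.rfl, if_pos, hdrop]
        rw [ih rest [] (List.reverse cur :: acc) (by simpa using Nat.le_of_succ_le_succ h)]
        simp [pvF]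
      · have hbe : ('|' == ch) = false := by simpa using fun h' => hc h'.symm
        simp only [hbe, Bool.false_eq_true, if_neg, not_false_iff]
        rw [ih rest (ch :: cur) acc (by simpa using Nat.le_of_succ_le_succ h)]
        simp [pvF, hc]

lemma pv_splitOn_eq (l : List Char) : PySem.Chars.splitOn l ['|'] = pvF [] l := by
  simpa using pv_splitOn_go_spec (l.length + 1) l [] [] (by omega)

lemma pv_pvF_chars : ∀ (l cur : List Char),
    ∃ t r, pvF cur l = t :: r ∧ cur.reverse ++ l = t ++ pvTailC r := by
  intro l
  induction l with
  | nil => intro cur; exact ⟨cur.reverse, [], by simp [pvF, pvTailC]⟩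
  | cons ch rest ih =>
    intro cur
    by_cases hc : ch = '|'
    · subst hc
      obtain ⟨t', r', h1, h2⟩ := ih []
      refine ⟨cur.reverse, t' :: r', by simp [pvF, h1], ?_⟩
      simp only [pvTailC]
      simp at h2
      simp [h2]
    · obtain ⟨t, r, h1, h2⟩ := ih (ch :: cur)
      refine ⟨t, r, by simp [pvF, hc, h1], ?_⟩
      simpa using h2

lemma pv_pvF_free : ∀ (l cur : List Char), '|' ∉ cur → ∀ t ∈ pvF cur l, '|' ∉ t := by
  intro l
  induction l with
  | nil =>
    intro cur hcur t ht
    simp [pvF] at ht; subst ht; simpa using hcur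
  | cons ch rest ih =>
    intro cur hcur t ht
    by_cases hc : ch = '|'
    · subst hc
      simp [pvF] at ht
      rcases ht with ht | ht
      · subst ht; simpa using hcur
      · exact ih [] (by simp) t ht
    · simp [pvF, hc] at ht
      exact ih (ch :: cur) (by simp [hcur, Ne.symm hc]) t ht

-- A's loop over a '|'-free chunk: parts untouched, depth shifted by the bracket balance, chars appended
lemma pv_foldA_token : ∀ (cs : List Char), '|' ∉ cs →
    ∀ (parts : List String) (depth : Int) (buf : List Char),
    cs.foldl pvStepA (parts, depth, buf)
      = (parts, depth + ((cs.count '[' : Int) - (cs.count ']' : Int)), buf ++ cs) := by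
  intro cs
  induction cs with
  | nil => intro _ parts depth buf; simp
  | cons ch rest ih =>
    intro h parts depth buf
    have hch : ch ≠ '|' := by simp at h; exact fun h' => h.1 h'.symm
    have hrest : '|' ∉ rest := by simp at h; exact h.2
    by_cases h1 : ch = '['
    · subst h1
      rw [List.foldl_cons,
        show pvStepA (parts, depth, buf) '[' = (parts, depth + 1, buf ++ ['[']) from by
          simp [pvStepA],
        ih hrest]
      simp
      try omega
    · by_cases h2 : ch = ']'
      · subst h2
        rw [List.foldl_cons,
          show pvStepA (parts, depth, buf) ']' = (parts, depth - 1, buf ++ [']']) from by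
            simp [pvStepA],
          ih hrest]
        simp
        try omega
      · rw [List.foldl_cons,
          show pvStepA (parts, depth, buf) ch = (parts, depth, buf ++ [ch]) from by
            simp [pvStepA, h1, h2, hch],
          ih hrest]
        simp [h1, h2]
        try omega

lemma pv_stepA_pipe (parts : List String) (depth : Int) (buf : List Char) :
    pvStepA (parts, depth, buf) '|'
      = if depth = 0 then (parts ++ [String.ofList buf], depth, ([] : List Char))
        else (parts, depth, buf ++ ['|']) := by
  simp only [pvStepA]
  rw [if_neg (by decide), if_neg (by decide)]
  by_cases hd : depth = 0
  · simp [hd]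
  · simp [hd]

-- consuming one token from an aligned pre-token state re-establishes the boundary relation
lemma pv_step_token (t : String) (ht : '|' ∉ t.toList) (parts : List String)
    (acc : Option String) (depth : Int)
    (hinv : (acc = none → depth = 0) ∧ ∀ a, acc = some a → depth ≠ 0 ∧ a ≠ "") :
    ∃ partsA' partsB' depth' buf' acc',
      t.toList.foldl pvStepA (parts, depth, pvPreBuf acc) = (partsA', depth', buf') ∧
      pvStepB (parts, acc, depth) t = (partsB', acc', depth') ∧
      pvRel partsA' partsB' depth' buf' acc' := by
  have hcl : (PySem.Str.count t "[" : Int) = (t.toList.count '[' : Int) := by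
    rw [pv_str_count_single t '[' "[" (by decide)]
  have hcr : (PySem.Str.count t "]" : Int) = (t.toList.count ']' : Int) := by
    rw [pv_str_count_single t ']' "]" (by decide)]
  cases acc with
  | none =>
    have hd : depth = 0 := hinv.1 rfl
    subst hd
    by_cases hz : (0 : Int) + (t.toList.count '[' : Int) - (t.toList.count ']' : Int) = 0
    · refine ⟨parts, parts ++ [t], 0 + (t.toList.count '[' : Int) - (t.toList.count ']' : Int),
        t.toList, none, ?_, ?_, ?_⟩
      · rw [pv_foldA_token t.toList ht]
        simp [pvPreBuf]
        try omega
      · simp only [pvStepB, hcl, hcr]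
        rw [if_pos hz]
      · exact Or.inl ⟨rfl, hz, by simp⟩
    · refine ⟨parts, parts, 0 + (t.toList.count '[' : Int) - (t.toList.count ']' : Int),
        t.toList, some t, ?_, ?_, ?_⟩
      · rw [pv_foldA_token t.toList ht]
        simp [pvPreBuf]
        try omega
      · simp only [pvStepB, hcl, hcr]
        rw [if_neg hz]
      · refine Or.inr ⟨t, rfl, ?_, hz, rfl, rfl⟩
        intro h0
        apply hz
        rw [h0]
        simp
  | some a =>
    obtain ⟨hd, ha⟩ := hinv.2 a rfl
    have hjoin : String.ofList (a.toList ++ '|' :: t.toList) = a ++ "|" ++ t := by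
      rw [← String.toList_inj]
      simp
    by_cases hz : depth + (t.toList.count '[' : Int) - (t.toList.count ']' : Int) = 0
    · refine ⟨parts, parts ++ [a ++ "|" ++ t],
        depth + (t.toList.count '[' : Int) - (t.toList.count ']' : Int),
        a.toList ++ '|' :: t.toList, none, ?_, ?_, ?_⟩
      · rw [pv_foldA_token t.toList ht]
        simp [pvPreBuf]
        try omega
      · simp only [pvStepB, hcl, hcr]
        rw [if_pos hz]
      · exact Or.inl ⟨rfl, hz, by rw [hjoin]⟩
    · refine ⟨parts, parts,
        depth + (t.toList.count '[' : Int) - (t.toList.count ']' : Int),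
        a.toList ++ '|' :: t.toList, some (a ++ "|" ++ t), ?_, ?_, ?_⟩
      · rw [pv_foldA_token t.toList ht]
        simp [pvPreBuf]
        try omega
      · simp only [pvStepB, hcl, hcr]
        rw [if_neg hz]
      · refine Or.inr ⟨a ++ "|" ++ t, rfl, ?_, hz, rfl, ?_⟩
        · intro h0
          have := congrArg String.toList h0
          simp at this
        · rw [← hjoin]; simp

-- main loop invariant: from any related boundary state, B over the remaining tokens
-- and A over the remaining characters produce the same final list
lemma pv_loop : ∀ (ts : List String), (∀ t ∈ ts, '|' ∉ t.toList) →
    ∀ (partsA partsB : List String) (depth : Int) (buf : List Char) (acc : Option String),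
    pvRel partsA partsB depth buf acc →
    pvFinishB (ts.foldl pvStepB (partsB, acc, depth))
      = pvFinishA ((pvTailS ts).foldl pvStepA (partsA, depth, buf)) := by
  intro ts
  induction ts with
  | nil =>
    intro _ partsA partsB depth buf acc hrel
    rcases hrel with ⟨hacc, hd, hp⟩ | ⟨a, hacc, ha, hd, hp, hb⟩
    · subst hacc; subst hp
      simp only [pvTailS, List.foldl_nil, pvFinishB, pvFinishA]
      by_cases hbuf : buf = []
      · subst hbuf
        rw [if_pos ⟨by simp, by simp⟩]
        simp
      · have hcond : ¬((partsA ++ [String.ofList buf]) ≠ [] ∧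
            (partsA ++ [String.ofList buf]).getLast? = some "") := by
          rintro ⟨-, hlast⟩
          rw [List.getLast?_concat] at hlast
          exact hbuf (by simpa using congrArg String.toList (Option.some.inj hlast))
        rw [if_neg hcond, if_pos hbuf]
    · subst hacc; subst hb
      rw [hp]
      simp only [pvTailS, List.foldl_nil, pvFinishB, pvFinishA]
      have hcond : ¬((partsA ++ [a]) ≠ [] ∧ (partsA ++ [a]).getLast? = some "") := by
        rintro ⟨-, hlast⟩
        rw [List.getLast?_concat] at hlast
        exact ha (Option.some.inj hlast)
      rw [if_neg hcond, if_pos (fun h0 => ha (by simpa using h0))]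
      simp
  | cons t rest ih =>
    intro hfree partsA partsB depth buf acc hrel
    have hinv : (acc = none → depth = 0) ∧ ∀ a, acc = some a → depth ≠ 0 ∧ a ≠ "" := by
      rcases hrel with ⟨hacc, hd, -⟩ | ⟨a, hacc, ha, hd, -, -⟩
      · subst hacc; exact And.intro (fun _ => hd) (fun a h => nomatch h)
      · subst hacc
        constructor
        · intro h; exact nomatch h
        · intro b h
          injection h with h'
          subst h'
          exact ⟨hd, ha⟩
    -- A consumes the separator '|', landing on the shared pre-token state
    have hsep : pvStepA (partsA, depth, buf) '|' = (partsB, depth, pvPreBuf acc) := by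
      rcases hrel with ⟨hacc, hd, hp⟩ | ⟨a, hacc, ha, hd, hp, hb⟩
      · subst hacc; subst hp; subst hd
        rw [pv_stepA_pipe, if_pos rfl]; rfl
      · subst hacc; subst hb
        rw [hp, pv_stepA_pipe, if_neg hd]; rfl
    obtain ⟨pA', pB', d', buf', acc', hA, hB, hrel'⟩ :=
      pv_step_token t (hfree t (by simp)) partsB acc depth hinv
    simp only [pvTailS, List.foldl_cons, List.foldl_append, hsep, hA, hB]
    exact ih (fun u hu => hfree u (by simp [hu])) pA' pB' d' buf' acc' hrel'

-- ===== VERDICT (by name: the statement is the Claim_ definition above) =====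
theorem split_schema_py_spec : Claim_equal_split_schema_py := by
  intro schema _
  show pvFinishA (schema.toList.foldl pvStepA ([], 0, []))
      = pvFinishB (((PySem.Chars.splitOn schema.toList ['|']).map String.ofList).foldl
          pvStepB ([], none, 0))
  rw [pv_splitOn_eq]
  obtain ⟨t, r, hF, hchars⟩ := pv_pvF_chars schema.toList []
  have hfree : ∀ u ∈ pvF [] schema.toList, '|' ∉ u := pv_pvF_free schema.toList [] (by simp)
  have hchars' : schema.toList = t ++ pvTailC r := by simpa using hchars
  have htfree : '|' ∉ t := hfree t (by simp [hF])
  rw [hF]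
  simp only [List.map_cons, List.foldl_cons]
  -- first token: A runs over t from the initial state, B takes one pvStepB step
  obtain ⟨pA', pB', d', buf', acc', hA, hB, hrel⟩ :=
    pv_step_token (String.ofList t) (by simpa using htfree) [] none 0
      ⟨fun _ => rfl, fun a h => nomatch h⟩
  have hA' : t.foldl pvStepA ([], (0 : Int), ([] : List Char)) = (pA', d', buf') := by
    simpa [pvPreBuf] using hA
  have hts : pvTailS (r.map String.ofList) = pvTailC r := by
    clear hchars hchars' hF hfree hA hA' hB
    induction r with
    | nil => simp [pvTailS, pvTailC]
    | cons u v ihr => simp [pvTailS, pvTailC, ihr]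
  have hloop := pv_loop (r.map String.ofList)
      (fun u hu => by
        obtain ⟨v, hv, rfl⟩ := List.mem_map.mp hu
        simpa using hfree v (by simp [hF, hv]))
      pA' pB' d' buf' acc' hrel
  rw [hB, hloop, hts, hchars', List.foldl_append, hA']
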